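-- pv_equiv track=rewrite | github.com/thermo-track/transformer-maintenance-system | phase3_fault_type/utils.py | unique_stem
-- ===== SOURCE A (Python) =====
-- from typing import List, Sequence, Tuple
--
-- def unique_stem(prefix: str, existing: Sequence[str]) -> str:
--     idx = 1
--     stem = f"{prefix}_{idx:03d}"
--     existing_set = set(existing)
--     while stem in existing_set:
--         idx += 1
--         stem = f"{prefix}_{idx:03d}"
--     return stem
-- ===== SOURCE B (Python) =====
-- def _stem_index(pre, name):
--     """Return v if name == pre + f"{v:03d}" for some v >= 0, else None."""
--     if not name.startswith(pre):
--         return None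
--     d = name[len(pre):]
--     if not d or any(c < '0' or c > '9' for c in d):
--         return None
--     # canonical zero-padded form: exactly 3 digits, or more with no leading zero
--     if len(d) != 3 and (len(d) < 3 or d[0] == '0'):
--         return None
--     v = 0
--     for c in d:
--         v = 10 * v + (ord(c) - 48)
--     return v
--
--
-- def unique_stem(prefix, existing):
--     # Parse every existing name once into its integer index, then walk the
--     # sorted distinct indices to find the first gap at or after 1.
--     pre = prefix + "_"
--     used = {v for v in (_stem_index(pre, name) for name in existing) if v is not None}
--     i = 1
--     for v in sorted(used):
--         if v == i:
--             i += 1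
--         elif v > i:
--             break
--     return f"{prefix}_{i:03d}"
-- ===== Notes on version B (the rewrite author's own statement) =====
-- stated objective: alternative
-- what changed: B parses each existing name once into its integer index (accepting only canonical zero-padded forms), sorts the distinct indices and scans them for the first gap, instead of A's unbounded probe loop that formats candidate stems and tests them against a set of the full names.
import Mathlib
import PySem

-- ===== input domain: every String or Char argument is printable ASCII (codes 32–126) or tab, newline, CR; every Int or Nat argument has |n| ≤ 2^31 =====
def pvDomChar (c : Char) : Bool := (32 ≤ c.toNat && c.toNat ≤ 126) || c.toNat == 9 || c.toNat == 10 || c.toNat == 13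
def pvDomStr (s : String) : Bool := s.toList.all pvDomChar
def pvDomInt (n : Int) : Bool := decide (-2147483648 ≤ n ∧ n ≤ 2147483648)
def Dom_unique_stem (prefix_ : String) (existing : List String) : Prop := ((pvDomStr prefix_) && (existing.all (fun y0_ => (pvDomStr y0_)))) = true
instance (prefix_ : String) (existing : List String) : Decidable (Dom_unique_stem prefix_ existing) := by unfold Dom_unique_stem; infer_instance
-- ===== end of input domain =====

-- B parses each existing name once into its integer index (canonical zero-padded
-- forms only), sorts the distinct indices and scans them for the first gap,
-- instead of A's probe loop formatting candidate stems (alternative algorithm;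
-- no speed claim).

-- f"{idx:03d}" — zero-pad str(idx) to width 3 (exact: Python's {:03d} = str(n).zfill(3));
-- both Pythons write this same format literal, so both ports use this primitive.
def fmt03 (idx : Int) : List Char := PySem.Chars.zfill (PySem.Int.toChars idx) 3

-- ===== PORT A =====
-- stem = f"{prefix}_{idx:03d}"
def uaStem (prefix_ : List Char) (idx : Int) : List Char := prefix_ ++ '_' :: fmt03 idx

-- while stem in existing_set: idx += 1; stem = …   (fuel = len(existing)+1: the
-- len(existing)+1 probed stems are pairwise distinct, so the set of at most
-- len(existing) strings cannot contain them all and the Python loop stops by then)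
def uaLoop (prefix_ : List Char) (exset : PySem.Set (List Char)) : Nat → Int → List Char
  | 0, idx => uaStem prefix_ idx
  | fuel + 1, idx =>
    if PySem.Set.contains exset (uaStem prefix_ idx) then
      uaLoop prefix_ exset fuel (idx + 1)
    else
      uaStem prefix_ idx

def unique_stem (prefix_ : String) (existing : List String) : String :=
  String.ofList (uaLoop prefix_.toList (PySem.Set.ofList (existing.map String.toList))
    (existing.length + 1) 1)

-- ===== PORT B =====
-- _stem_index(pre, name): the index v with name == pre + f"{v:03d}", else None
def pbParse (pre name : List Char) : Option Int :=
  if ¬ PySem.Chars.startswith name pre then none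
  else
    let d := PySem.List.slice name (some (pre.length : Int)) none
    if d.isEmpty || d.any (fun c => decide (c < '0') || decide ('9' < c)) then none
    else if d.length ≠ 3 ∧ (d.length < 3 ∨ d.head? = some '0') then none
    else some (d.foldl (fun v c => 10 * v + ((c.toNat : Int) - 48)) 0)

-- for v in sorted(used): if v == i: i += 1; elif v > i: break
def pbScan : List Int → Int → Int
  | [], i => i
  | v :: rest, i =>
    if v = i then pbScan rest (i + 1)
    else if i < v then i
    else pbScan rest i

def unique_stem_alt (prefix_ : String) (existing : List String) : String :=
  let pre := prefix_.toList ++ ['_']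
  let used : PySem.Set Int :=
    PySem.Set.ofList ((existing.map String.toList).filterMap (pbParse pre))
  let i := pbScan (PySem.List.sorted used (fun v => v) false) 1
  String.ofList (pre ++ fmt03 i)

-- ===== PRECONDITION & SPEC =====
def Spec_unique_stem (prefix_ : String) (existing : List String) (out : String) : Prop := out = unique_stem_alt prefix_ existing
instance (prefix_ : String) (existing : List String) (out : String) : Decidable (Spec_unique_stem prefix_ existing out) := by unfold Spec_unique_stem; infer_instance

-- ===== CLAIM (what is proved, stated in full; the proofs are below) =====
def Claim_equal_unique_stem : Prop := ∀ (prefix_ : String) (existing : List String), Dom_unique_stem prefix_ existing → Spec_unique_stem prefix_ existing (unique_stem prefix_ existing)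

-- ===== LEMMAS AND PROOFS =====

-- str(n) for n ≥ 0, as its own recursion (most significant digit first)
def myD (n : Nat) : List Char :=
  if n < 10 then [Nat.digitChar n] else myD (n / 10) ++ [Nat.digitChar (n % 10)]
decreasing_by exact Nat.div_lt_self (by omega) (by omega)

-- character facts
theorem digit_mem (c : Char) (h0 : '0' ≤ c) (h9 : c ≤ '9') :
    c ∈ ['0', '1', '2', '3', '4', '5', '6', '7', '8', '9'] := by
  rw [Char.le_def, UInt32.le_iff_toNat_le] at h0 h9
  have hb : 48 ≤ c.toNat ∧ c.toNat ≤ 57 := ⟨h0, h9⟩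
  have hcases : c.toNat = 48 ∨ c.toNat = 49 ∨ c.toNat = 50 ∨ c.toNat = 51 ∨ c.toNat = 52 ∨
      c.toNat = 53 ∨ c.toNat = 54 ∨ c.toNat = 55 ∨ c.toNat = 56 ∨ c.toNat = 57 := by omega
  rcases hcases with h | h | h | h | h | h | h | h | h | h
  · rw [Char.ext (UInt32.toNat_inj.mp (show c.toNat = '0'.toNat from h))]; decide
  · rw [Char.ext (UInt32.toNat_inj.mp (show c.toNat = '1'.toNat from h))]; decide
  · rw [Char.ext (UInt32.toNat_inj.mp (show c.toNat = '2'.toNat from h))]; decide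
  · rw [Char.ext (UInt32.toNat_inj.mp (show c.toNat = '3'.toNat from h))]; decide
  · rw [Char.ext (UInt32.toNat_inj.mp (show c.toNat = '4'.toNat from h))]; decide
  · rw [Char.ext (UInt32.toNat_inj.mp (show c.toNat = '5'.toNat from h))]; decide
  · rw [Char.ext (UInt32.toNat_inj.mp (show c.toNat = '6'.toNat from h))]; decide
  · rw [Char.ext (UInt32.toNat_inj.mp (show c.toNat = '7'.toNat from h))]; decide
  · rw [Char.ext (UInt32.toNat_inj.mp (show c.toNat = '8'.toNat from h))]; decide
  · rw [Char.ext (UInt32.toNat_inj.mp (show c.toNat = '9'.toNat from h))]; decide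

theorem toNat_ge_of_zero_le (c : Char) (h : '0' ≤ c) : 48 ≤ c.toNat := by
  rw [Char.le_def, UInt32.le_iff_toNat_le] at h
  exact h

theorem toNat_le_of_le_nine (c : Char) (h : c ≤ '9') : c.toNat ≤ 57 := by
  rw [Char.le_def, UInt32.le_iff_toNat_le] at h
  exact h

theorem digitChar_digit (k : Nat) (h : k < 10) :
    '0' ≤ Nat.digitChar k ∧ Nat.digitChar k ≤ '9' := by
  interval_cases k <;> decide

theorem myD_eq_toDigitsCore (f : Nat) : ∀ (n : Nat) (l : List Char), n < 10 ^ f →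
    Nat.toDigitsCore 10 f n l = (if f = 0 then l else myD n ++ l) := by
  induction f with
  | zero => intro n l h; simp [Nat.toDigitsCore]
  | succ f ih =>
    intro n l h
    simp only [Nat.toDigitsCore]
    by_cases h0 : n / 10 = 0
    · have hn : n < 10 := by omega
      rw [if_pos h0, if_neg (by omega), myD, if_pos hn, Nat.mod_eq_of_lt hn]
      rfl
    · rw [if_neg h0]
      have hdiv : n / 10 < 10 ^ f := by
        have h10 : n < 10 ^ f * 10 := by rw [← pow_succ]; exact h
        omega
      rw [ih _ _ hdiv]
      have hf0 : f ≠ 0 := by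
        intro hf; subst hf; simp at hdiv; omega
      rw [if_neg hf0, if_neg (by omega)]
      have hn : ¬ n < 10 := by omega
      conv_rhs => rw [myD, if_neg hn]
      simp

theorem toChars_eq_myD (n : Nat) : PySem.Int.toChars (n : Int) = myD n := by
  have h1 : ¬ ((n : Int) < 0) := by omega
  simp only [PySem.Int.toChars, if_neg h1, Int.toNat_natCast]
  have h2 : Nat.toDigits 10 n = Nat.toDigitsCore 10 (n + 1) n [] := rfl
  rw [h2, myD_eq_toDigitsCore (n + 1) n []
    (lt_of_lt_of_le (Nat.lt_pow_self (by omega)) (Nat.pow_le_pow_right (by omega) (by omega)))]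
  simp

theorem myD_ne_nil (n : Nat) : myD n ≠ [] := by
  rw [myD]; split_ifs <;> simp

theorem myD_digits (n : Nat) : ∀ c ∈ myD n, '0' ≤ c ∧ c ≤ '9' := by
  induction n using myD.induct with
  | case1 n h =>
    rw [myD, if_pos h]
    intro c hc
    rw [List.mem_singleton] at hc
    subst hc
    exact digitChar_digit n h
  | case2 n h ih =>
    rw [myD, if_neg h]
    intro c hc
    rcases List.mem_append.mp hc with hc | hc
    · exact ih c hc
    · rw [List.mem_singleton] at hc
      subst hc
      exact digitChar_digit _ (Nat.mod_lt _ (by omega))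

theorem myD_head_ne_zero (n : Nat) (h : 1 ≤ n) : (myD n).head? ≠ some '0' := by
  induction n using myD.induct with
  | case1 n hn =>
    rw [myD, if_pos hn]
    interval_cases n <;> decide
  | case2 n hn ih =>
    rw [myD, if_neg hn, List.head?_append]
    rcases hm : myD (n / 10) with _ | ⟨c, t⟩
    · exact absurd hm (myD_ne_nil _)
    · have := ih (by omega)
      rw [hm] at this
      simpa using this

def valStep (v : Int) (c : Char) : Int := 10 * v + ((c.toNat : Int) - 48)

theorem digitChar_toNat (k : Nat) (h : k < 10) : (Nat.digitChar k).toNat = k + 48 := by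
  interval_cases k <;> rfl

theorem digitChar_of_digit (c : Char) (h0 : '0' ≤ c) (h9 : c ≤ '9') :
    Nat.digitChar (c.toNat - 48) = c := by
  have := digit_mem c h0 h9
  fin_cases this <;> decide

theorem myD_val (n : Nat) : ∀ (a : Int),
    (myD n).foldl valStep a = a * 10 ^ (myD n).length + n := by
  induction n using myD.induct with
  | case1 n hn =>
    intro a
    rw [myD, if_pos hn]
    simp only [List.foldl_cons, List.foldl_nil, valStep, List.length_singleton, pow_one]
    rw [digitChar_toNat n hn]
    push_cast
    ring
  | case2 n hn ih =>
    intro a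
    rw [myD, if_neg hn]
    rw [List.foldl_append, ih a]
    simp only [List.foldl_cons, List.foldl_nil, valStep, List.length_append,
      List.length_singleton]
    rw [digitChar_toNat _ (Nat.mod_lt _ (by omega))]
    have hsplit : (n : Int) = 10 * ((n / 10 : Nat) : Int) + ((n % 10 : Nat) : Int) := by
      push_cast
      omega
    rw [pow_succ, hsplit]
    push_cast
    ring

theorem val_zeros (k : Nat) : (List.replicate k '0').foldl valStep 0 = 0 := by
  induction k with
  | zero => rfl
  | succ k ih => rw [List.replicate_succ, List.foldl_cons]; simpa [valStep] using ih

theorem val_nonneg (l : List Char) (hd : ∀ c ∈ l, '0' ≤ c ∧ c ≤ '9') :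
    ∀ a : Int, 0 ≤ a → a ≤ l.foldl valStep a := by
  induction l with
  | nil => intro a _; simp
  | cons c t ih =>
    intro a ha
    have hc := hd c (List.mem_cons_self)
    have h48 : (48 : Int) ≤ (c.toNat : Int) := by
      have := toNat_ge_of_zero_le c hc.1; omega
    have hstep : a ≤ valStep a c := by
      simp only [valStep]; omega
    have hstep0 : 0 ≤ valStep a c := by
      simp only [valStep]; omega
    calc a ≤ valStep a c := hstep
      _ ≤ t.foldl valStep (valStep a c) := ih (fun x hx => hd x (List.mem_cons_of_mem _ hx)) _ hstep0
      _ = (c :: t).foldl valStep a := by rw [List.foldl_cons]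

-- a nonempty digit string without a leading zero has value ≥ 1
theorem val_pos (s : List Char) (hne : s ≠ []) (hd : ∀ c ∈ s, '0' ≤ c ∧ c ≤ '9')
    (hh : s.head? ≠ some '0') : 1 ≤ s.foldl valStep 0 := by
  rcases s with _ | ⟨c, t⟩
  · exact absurd rfl hne
  · have hc := hd c (List.mem_cons_self)
    have hcz : c ≠ '0' := by intro h; subst h; simp at hh
    have h49 : 49 ≤ c.toNat := by
      have h48 := toNat_ge_of_zero_le c hc.1
      rcases Nat.lt_or_ge c.toNat 49 with h | h
      · exfalso
        have : c.toNat = 48 := by omega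
        exact hcz (Char.ext (UInt32.toNat_inj.mp this))
      · exact h
    rw [List.foldl_cons]
    have h1 : 1 ≤ valStep 0 c := by simp only [valStep]; omega
    calc (1 : Int) ≤ valStep 0 c := h1
      _ ≤ t.foldl valStep (valStep 0 c) :=
        val_nonneg t (fun x hx => hd x (List.mem_cons_of_mem _ hx)) _ (by omega)

theorem myD_roundtrip (s : List Char) (hne : s ≠ []) (hd : ∀ c ∈ s, '0' ≤ c ∧ c ≤ '9')
    (hh : s.head? ≠ some '0') : myD (s.foldl valStep 0).toNat = s ∧ 0 ≤ s.foldl valStep 0 := by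
  induction s using List.reverseRecOn with
  | nil => exact absurd rfl hne
  | append_singleton u c ih =>
    have hc : '0' ≤ c ∧ c ≤ '9' := hd c (by simp)
    have hr48 : 48 ≤ c.toNat := toNat_ge_of_zero_le c hc.1
    have hr57 : c.toNat ≤ 57 := toNat_le_of_le_nine c hc.2
    have hval : (u ++ [c]).foldl valStep 0
        = 10 * u.foldl valStep 0 + ((c.toNat : Int) - 48) := by
      rw [List.foldl_append]; rfl
    rcases eq_or_ne u [] with rfl | hu
    · simp only [List.nil_append] at *
      have hv : [c].foldl valStep 0 = (c.toNat : Int) - 48 := by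
        simp [valStep]
      rw [hv]
      refine ⟨?_, by omega⟩
      have ht : ((c.toNat : Int) - 48).toNat = c.toNat - 48 := by omega
      rw [ht, myD, if_pos (by omega), digitChar_of_digit c hc.1 hc.2]
    · have hdu : ∀ x ∈ u, '0' ≤ x ∧ x ≤ '9' := fun x hx => hd x (by simp [hx])
      have hhu : u.head? ≠ some '0' := by
        rcases u with _ | ⟨c0, t0⟩
        · exact absurd rfl hu
        · simpa using hh
      have hIH := ih hu hdu hhu
      have hVpos := val_pos u hu hdu hhu
      set V := u.foldl valStep 0 with hV
      have hv10 : 10 ≤ (u ++ [c]).foldl valStep 0 := by rw [hval]; omega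
      refine ⟨?_, by omega⟩
      rw [hval]
      have hdivmod : (10 * V + ((c.toNat : Int) - 48)).toNat
          = 10 * V.toNat + (c.toNat - 48) := by omega
      rw [hdivmod, myD, if_neg (by omega)]
      have hq : (10 * V.toNat + (c.toNat - 48)) / 10 = V.toNat := by omega
      have hm : (10 * V.toNat + (c.toNat - 48)) % 10 = c.toNat - 48 := by omega
      rw [hq, hm, hIH.1, digitChar_of_digit c hc.1 hc.2]

-- zfill on a digit string (no sign): pad with zeros to width 3
theorem zfill_digits (L : List Char) (hne : L ≠ []) (hd : ∀ c ∈ L, '0' ≤ c ∧ c ≤ '9') :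
    PySem.Chars.zfill L 3 = List.replicate (3 - L.length) '0' ++ L := by
  rcases L with _ | ⟨c, rest⟩
  · exact absurd rfl hne
  · have hc := hd c (List.mem_cons_self)
    have hsign : ¬ (c = '+' ∨ c = '-') := by
      rintro (rfl | rfl) <;> exact absurd hc.1 (by decide)
    by_cases h3 : (3 : Int) ≤ ((c :: rest).length : Int)
    · have hlen : 3 ≤ (c :: rest).length := by exact_mod_cast h3
      rw [PySem.Chars.zfill, if_pos h3]
      have : 3 - (c :: rest).length = 0 := by omega
      rw [this, List.replicate_zero, List.nil_append]
    · have hlen : (c :: rest).length < 3 := by omega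
      rw [PySem.Chars.zfill, if_neg h3]
      simp only [hsign, if_false]
      simp

-- fmt03 j for j ≥ 0, in terms of myD
theorem fmt03_eq (j : Int) (hj : 0 ≤ j) :
    fmt03 j = List.replicate (3 - (myD j.toNat).length) '0' ++ myD j.toNat := by
  have hcast : (j.toNat : Int) = j := Int.toNat_of_nonneg hj
  rw [fmt03, ← hcast, toChars_eq_myD]
  exact zfill_digits _ (myD_ne_nil _) (myD_digits _)

-- (F1) B's parser accepts exactly the stems A generates, returning their index
-- every character of the padded digit string is a digit
theorem fmt03_digits (j : Int) (hj : 0 ≤ j) : ∀ c ∈ fmt03 j, '0' ≤ c ∧ c ≤ '9' := by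
  rw [fmt03_eq j hj]
  intro c hc
  rcases List.mem_append.mp hc with hc | hc
  · rw [List.eq_of_mem_replicate hc]; exact ⟨le_refl _, by decide⟩
  · exact myD_digits _ c hc

theorem myD_zero : myD 0 = ['0'] := by rw [myD]; rfl

theorem parse_fmt (pre : List Char) (j : Int) (hj : 0 ≤ j) :
    pbParse pre (pre ++ fmt03 j) = some j := by
  have hstart : PySem.Chars.startswith (pre ++ fmt03 j) pre = true :=
    (PySem.Chars.startswith_iff _ _).mpr (List.prefix_append _ _)
  have hslice : PySem.List.slice (pre ++ fmt03 j) (some (pre.length : Int)) none = fmt03 j := by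
    rw [PySem.List.slice_from_natCast, List.drop_left]
  have hdig := fmt03_digits j hj
  have hne : fmt03 j ≠ [] := by
    rw [fmt03_eq j hj]
    simp [myD_ne_nil]
  rw [pbParse, if_neg (by simp [hstart])]
  simp only [hslice]
  have hany : (fmt03 j).any (fun c => decide (c < '0') || decide ('9' < c)) = false := by
    rw [List.any_eq_false]
    intro c hc
    have := hdig c hc
    simp [not_lt.mpr this.1, not_lt.mpr this.2]
  rw [if_neg (by simp [hany, hne])]
  set k := (myD j.toNat).length with hk
  have hk1 : 1 ≤ k := by
    rw [hk]
    rcases hm : myD j.toNat with _ | ⟨c, t⟩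
    · exact absurd hm (myD_ne_nil _)
    · simp
  have hlen : (fmt03 j).length = (3 - k) + k := by
    rw [fmt03_eq j hj, List.length_append, List.length_replicate]
  have hshape : ¬ ((fmt03 j).length ≠ 3 ∧ ((fmt03 j).length < 3 ∨ (fmt03 j).head? = some '0')) := by
    by_cases hk3 : k ≤ 3
    · rintro ⟨hne3, _⟩
      rw [hlen] at hne3
      omega
    · rintro ⟨_, h | h⟩
      · rw [hlen] at h
        omega
      · have hrep : 3 - k = 0 := by omega
        rw [fmt03_eq j hj, hrep, List.replicate_zero, List.nil_append] at h
        have hjpos : 1 ≤ j.toNat := by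
          by_contra hz
          have : j.toNat = 0 := by omega
          rw [this, myD_zero] at hk
          simp at hk
          omega
        exact myD_head_ne_zero _ hjpos h
  rw [if_neg hshape]
  congr 1
  have hfold : (fmt03 j).foldl (fun v c => 10 * v + ((c.toNat : Int) - 48)) 0
      = (fmt03 j).foldl valStep 0 := rfl
  rw [hfold, fmt03_eq j hj, List.foldl_append, val_zeros, myD_val, zero_mul, zero_add]
  exact Int.toNat_of_nonneg hj

-- (F2) whatever B's parser accepts is such a stem
theorem parse_complete (pre name : List Char) (v : Int) (h : pbParse pre name = some v) :
    0 ≤ v ∧ name = pre ++ fmt03 v := by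
  rw [pbParse] at h
  split_ifs at h with h1
  obtain ⟨t, rfl⟩ := (PySem.Chars.startswith_iff _ _).mp h1
  rw [PySem.List.slice_from_natCast] at h
  simp only [List.drop_left] at h
  split_ifs at h with h2 h3
  simp only [Option.some.injEq] at h
  have hvt : v = t.foldl valStep 0 := by rw [← h]; rfl
  have hne : t ≠ [] := by
    intro hnil; subst hnil; simp at h2
  have hany : (t.any fun c => decide (c < '0') || decide ('9' < c)) = false := by
    rcases Bool.eq_false_or_eq_true (t.any fun c => decide (c < '0') || decide ('9' < c))
      with hb | hb
    · exact absurd (Or.inr hb) (by simpa [not_or] using h2)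
    · exact hb
  have hdt : ∀ c ∈ t, '0' ≤ c ∧ c ≤ '9' := by
    intro c hc
    have := List.any_eq_false.mp hany c hc
    simp only [Bool.or_eq_true, decide_eq_true_eq, not_or, not_lt] at this
    exact ⟨this.1, this.2⟩
  have hshape : t.length = 3 ∨ (3 < t.length ∧ t.head? ≠ some '0') := by
    by_cases hl : t.length = 3
    · exact Or.inl hl
    · push Not at h3
      obtain ⟨hge, hhead⟩ := h3 hl
      exact Or.inr ⟨by omega, hhead⟩
  set z := t.takeWhile (fun c => c == '0') with hz
  set s := t.dropWhile (fun c => c == '0') with hs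
  have hzs : z ++ s = t := List.takeWhile_append_dropWhile
  have hzzero : ∀ c ∈ z, c = '0' := by
    intro c hc
    have := List.mem_takeWhile_imp hc
    simpa using this
  have hzrep : z = List.replicate z.length '0' := List.eq_replicate_of_mem hzzero
  have hvalz : z.foldl valStep 0 = 0 := by rw [hzrep]; exact val_zeros _
  have hval : t.foldl valStep 0 = s.foldl valStep 0 := by
    rw [← hzs, List.foldl_append, hvalz]
  rcases eq_or_ne s [] with hsnil | hsne
  · -- t is all zeros: canonical only as "000"
    have ht : t = z := by rw [← hzs, hsnil, List.append_nil]
    have hhead : t.head? = some '0' := by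
      rcases ht' : t with _ | ⟨c, t'⟩
      · exact absurd ht' hne
      · have hc0 : c = '0' := hzzero c (by rw [← ht, ht']; exact List.mem_cons_self)
        rw [hc0]
        rfl
    have hlen3 : t.length = 3 := by
      rcases hshape with hl | ⟨_, hh⟩
      · exact hl
      · exact absurd hhead hh
    have ht3 : t = ['0', '0', '0'] := by
      have hzl : z.length = 3 := by rw [← ht]; exact hlen3
      rw [ht, hzrep, hzl]
      rfl
    have hv0 : v = 0 := by
      rw [hvt, hval, hsnil]
      rfl
    subst hv0
    refine ⟨le_refl _, ?_⟩
    have hf0 : fmt03 0 = ['0', '0', '0'] := by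
      rw [fmt03_eq 0 (by omega)]
      have : (0 : Int).toNat = 0 := rfl
      rw [this, myD_zero]
      rfl
    rw [ht3, hf0]
  · -- t = zeros ++ s with s starting in a nonzero digit
    have hheads : s.head? ≠ some '0' := by
      have := List.head?_dropWhile_not (fun c => c == '0') t
      rw [← hs] at this
      intro hc
      rw [hc] at this
      simp at this
    have hds : ∀ c ∈ s, '0' ≤ c ∧ c ≤ '9' := by
      intro c hc
      exact hdt c ((List.dropWhile_sublist _).subset (by rw [hs] at hc; exact hc))
    obtain ⟨hmyd, hv0⟩ := myD_roundtrip s hsne hds hheads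
    have hvs : v = s.foldl valStep 0 := by rw [hvt, hval]
    have hfmt : fmt03 v = List.replicate (3 - s.length) '0' ++ s := by
      rw [fmt03_eq v (by omega), hvs, hmyd]
    have hlensum : z.length + s.length = t.length := by
      rw [← hzs, List.length_append]
    have hs1 : 1 ≤ s.length := by
      rcases hs' : s with _ | ⟨c, t'⟩
      · exact absurd hs' hsne
      · simp
    have hzlen : z.length = 3 - s.length := by
      rcases hshape with hl | ⟨hgt, hh⟩
      · omega
      · -- no leading zeros at all: z = []
        have hznil : z = [] := by
          rcases ht' : t with _ | ⟨c, t'⟩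
          · exact absurd ht' hne
          · have hc0 : c ≠ '0' := by
              intro hc
              rw [ht'] at hh
              rw [hc] at hh
              simp at hh
            rw [hz, ht', List.takeWhile_cons, if_neg (by simpa using hc0)]
        have hz0 : z.length = 0 := by rw [hznil]; rfl
        omega
    refine ⟨by omega, ?_⟩
    rw [hfmt, ← hzs, ← hzlen, ← hzrep]

-- A's probe loop, index level
def intLoop (f : Int → Bool) : Nat → Int → Int
  | 0, i => i
  | fuel + 1, i => if f i then intLoop f fuel (i + 1) else i

theorem uaLoop_eq_intLoop (p : List Char) (exset : PySem.Set (List Char)) :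
    ∀ (fuel : Nat) (idx : Int),
      uaLoop p exset fuel idx
        = uaStem p (intLoop (fun j => PySem.Set.contains exset (uaStem p j)) fuel idx) := by
  intro fuel
  induction fuel with
  | zero => intro idx; simp [uaLoop, intLoop]
  | succ n ih =>
    intro idx
    rw [uaLoop, intLoop]
    by_cases h : PySem.Set.contains exset (uaStem p idx) = true
    · rw [if_pos h, if_pos h, ih]
    · rw [if_neg h, if_neg h]

-- the probe loop on a membership oracle = the scan over the sorted member list
theorem intLoop_eq_pbScan (f : Int → Bool) :
    ∀ (l : List Int) (fuel : Nat) (i : Int), l.Pairwise (· < ·) → l.length < fuel →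
      (∀ j, i ≤ j → (f j = true ↔ j ∈ l)) → intLoop f fuel i = pbScan l i := by
  intro l
  induction l with
  | nil =>
    intro fuel i _ hf hspec
    obtain ⟨fuel', rfl⟩ : ∃ k, fuel = k + 1 := ⟨fuel - 1, by omega⟩
    have : f i = false := by
      rcases Bool.eq_false_or_eq_true (f i) with h | h
      · exact absurd ((hspec i le_rfl).mp h) (List.not_mem_nil)
      · exact h
    simp [intLoop, pbScan, this]
  | cons v rest ih =>
    intro fuel i hp hf hspec
    obtain ⟨fuel', rfl⟩ : ∃ k, fuel = k + 1 := ⟨fuel - 1, by omega⟩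
    rcases lt_trichotomy v i with hvi | hvi | hvi
    · -- v < i : drop v
      have : pbScan (v :: rest) i = pbScan rest i := by
        rw [pbScan, if_neg (by omega), if_neg (by omega)]
      rw [this]
      exact ih (fuel' + 1) i hp.of_cons (by simp at hf ⊢; omega)
        (fun j hj => by
          rw [hspec j hj, List.mem_cons]
          have hne : j ≠ v := by omega
          simp [hne])
    · -- v = i : step both
      subst hvi
      have hfv : f v = true := (hspec v le_rfl).mpr (List.mem_cons_self)
      rw [intLoop, if_pos hfv, pbScan, if_pos rfl]
      exact ih fuel' (v + 1) hp.of_cons (by simp at hf ⊢; omega)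
        (fun j hj => by
          rw [hspec j (by omega), List.mem_cons]
          have hne : j ≠ v := by omega
          simp [hne])
    · -- i < v : stop
      have hfi : f i = false := by
        rcases Bool.eq_false_or_eq_true (f i) with h | h
        · exfalso
          rcases List.mem_cons.mp ((hspec i le_rfl).mp h) with h' | h'
          · omega
          · have := List.rel_of_pairwise_cons hp h'
            omega
        · exact h
      rw [intLoop, if_neg (by simp [hfi]), pbScan, if_neg (by omega), if_pos hvi]

-- ===== VERDICT (by name: the statement is the Claim_ definition above) =====
theorem unique_stem_spec : Claim_equal_unique_stem := by
  intro prefix_ existing _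
  unfold Spec_unique_stem unique_stem unique_stem_alt
  set p := prefix_.toList
  set ex := existing.map String.toList with hex
  set pre := p ++ ['_'] with hpre
  set exset := PySem.Set.ofList ex
  set used : PySem.Set Int := PySem.Set.ofList (ex.filterMap (pbParse pre)) with hused
  set l := PySem.List.sorted used (fun v => v) false with hl
  have hstem : ∀ j : Int, uaStem p j = pre ++ fmt03 j := by
    intro j; simp [uaStem, hpre]
  have hloop :
      intLoop (fun j => PySem.Set.contains exset (uaStem p j)) (existing.length + 1) 1
        = pbScan l 1 := by
    apply intLoop_eq_pbScan
    · rw [hl, hused]; exact PySem.List.sorted_ofList_pairwise_lt _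
    · have h1 : l.length = used.length := by rw [hl]; exact PySem.List.length_sorted _ _ _
      have h2 : used.length ≤ (ex.filterMap (pbParse pre)).length :=
        PySem.Set.length_ofList_le _
      have h3 : (ex.filterMap (pbParse pre)).length ≤ ex.length :=
        List.length_filterMap_le _ _
      have h4 : ex.length = existing.length := by simp [hex]
      omega
    · intro j hj
      rw [hstem j, PySem.Set.contains_iff, PySem.Set.mem_ofList, hl,
        PySem.List.mem_sorted, hused, PySem.Set.mem_ofList, List.mem_filterMap]
      constructor
      · intro hmem
        exact ⟨pre ++ fmt03 j, hmem, parse_fmt pre j (by omega)⟩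
      · rintro ⟨name, hname, hparse⟩
        obtain ⟨_, rfl⟩ := parse_complete pre name j hparse
        exact hname
  rw [uaLoop_eq_intLoop, hloop, hstem]
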